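-- pv_equiv track=rewrite | github.com/GreenlightsSerenade/Test | 백준/Gold/2629. 양팔저울/양팔저울.py | solution
-- ===== SOURCE A (Python) =====
-- def solution(n, gs, m, cks):
--     s = sum(gs)
--     DP = [[0 for _ in range(2 * s + 10)] for _ in range(n)]
--     DP[0][0] = 1
--     DP[0][-gs[0]] = 1
--     DP[0][gs[0]] = 1
--     for i in range(1, n):
--         for j in range(s + 1):
--             if DP[i - 1][j] == 1:
--                 DP[i][j - gs[i]] = 1
--                 DP[i][j] = 1
--                 if j + gs[i] <= s:
--                     DP[i][j + gs[i]] = 1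
--         for j in range(s + 1):
--             if DP[i - 1][-j] == 1:
--                 DP[i][-j - gs[i]] = 1
--                 DP[i][-j] = 1
--                 if gs[i] - j >= -s:
--                     DP[i][gs[i] - j] = 1
--     mm = []
--     for elem in cks:
--         if elem > s or DP[-1][elem] == 0:
--             mm.append('N')
--         else:
--             mm.append('Y')
--     return ' '.join(mm)
-- ===== SOURCE B (Python) =====
-- def solution(n, gs, m, cks):
--     def reach(i):
--         # signed sums measurable with the first i weights
--         if i == 0:
--             return {0}
--         w = gs[i - 1]
--         return {x for d in reach(i - 1) for x in (d + w, d - w, d)}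
--     r = reach(n)
--     return ' '.join('Y' if c in r else 'N' for c in cks)
-- ===== Notes on version B (the rewrite author's own statement) =====
-- stated objective: simpler
-- what changed: Replaces A's n-by-(2s+10) signed-index 0/1 DP table (three nested loops plus per-query table reads) with a single set of reachable signed sums rebuilt once per weight and queried by membership.
-- outside the precondition, e.g. on solution(1, [1], 1, [-11]): A returns 'Y', B returns 'N'; on solution(2, [3, -1], 1, [1]): A returns 'Y', B returns 'Y'
import Mathlib
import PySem

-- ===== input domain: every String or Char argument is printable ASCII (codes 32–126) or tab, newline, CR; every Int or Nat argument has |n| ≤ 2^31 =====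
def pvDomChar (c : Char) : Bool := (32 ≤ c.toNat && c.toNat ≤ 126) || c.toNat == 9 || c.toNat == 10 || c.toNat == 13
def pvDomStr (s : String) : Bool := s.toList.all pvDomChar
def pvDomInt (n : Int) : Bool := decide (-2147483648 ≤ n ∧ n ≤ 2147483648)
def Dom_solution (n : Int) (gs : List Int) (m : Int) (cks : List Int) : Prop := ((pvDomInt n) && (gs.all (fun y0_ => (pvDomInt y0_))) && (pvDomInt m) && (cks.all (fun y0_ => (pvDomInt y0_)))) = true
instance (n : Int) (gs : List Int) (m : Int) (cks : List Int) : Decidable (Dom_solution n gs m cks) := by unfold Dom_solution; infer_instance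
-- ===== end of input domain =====

-- B replaces A's n × (2s+10) signed-index 0/1 DP table by a single set of reachable signed sums; equal return values on Pre_.

-- ===== PORT A =====
-- row for i = 0: DP[0][0] = 1; DP[0][-gs[0]] = 1; DP[0][gs[0]] = 1  (pySetD = Python list assignment, exact for in-range indices, which Pre_ guarantees)
def solRow0 (g0 s : Int) : List Int :=
  PySem.List.pySetD (PySem.List.pySetD (PySem.List.pySetD (List.replicate (2 * s + 10).toNat 0) 0 1) (-g0) 1) g0 1

-- body of 'for i in range(1, n)': the two scans over j in range(s+1) filling row i from row i-1
def solStep (s g : Int) (prev : List Int) : List Int :=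
  let cur := List.replicate (2 * s + 10).toNat 0
  let cur := (PySem.List.pyRange 0 (s + 1) 1).foldl (fun cur j =>
    if PySem.List.pyGetD prev j 0 == 1 then
      let cur := PySem.List.pySetD cur (j - g) 1
      let cur := PySem.List.pySetD cur j 1
      if j + g ≤ s then PySem.List.pySetD cur (j + g) 1 else cur
    else cur) cur
  (PySem.List.pyRange 0 (s + 1) 1).foldl (fun cur j =>
    if PySem.List.pyGetD prev (-j) 0 == 1 then
      let cur := PySem.List.pySetD cur (-j - g) 1
      let cur := PySem.List.pySetD cur (-j) 1
      if g - j ≥ -s then PySem.List.pySetD cur (g - j) 1 else cur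
    else cur) cur

def solution (n : Int) (gs : List Int) (m : Int) (cks : List Int) : String :=
  let s := gs.sum
  -- DP kept as the list of finished rows; DP[i-1] read with pyGetD, DP[-1] with index -1 (gs[0]/gs[i] reads are in range under Pre_)
  let dp : List (List Int) := [solRow0 (PySem.List.pyGetD gs 0 0) s]
  let dp := (PySem.List.pyRange 1 n 1).foldl (fun dp i =>
    dp ++ [solStep s (PySem.List.pyGetD gs i 0) (PySem.List.pyGetD dp (i - 1) [])]) dp
  let mm := cks.foldl (fun mm elem =>
    mm ++ [if elem > s || PySem.List.pyGetD (PySem.List.pyGetD dp (-1) []) elem 0 == 0 then "N" else "Y"]) []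
  PySem.Str.join " " mm

-- ===== PORT B =====
-- reach i = signed sums measurable with the first i weights (Source B's inner recursion; gs[i-1] in range under Pre_)
def solAltReach (gs : List Int) : Nat → PySem.Set Int
  | 0 => PySem.Set.ofList [0]
  | i + 1 =>
    let w := PySem.List.pyGetD gs (((i : Int) + 1) - 1) 0
    PySem.Set.ofList ((solAltReach gs i).flatMap (fun d => [d + w, d - w, d]))

def solution_alt (n : Int) (gs : List Int) (m : Int) (cks : List Int) : String :=
  -- Python's reach(n) raises for n < 0 (negative-index recursion) and n > len(gs) (IndexError), both outside Pre_;
  -- the port recurses on n.toNat, the depth Python actually recurses to on the admitted inputs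
  let r := solAltReach gs n.toNat
  PySem.Str.join " " (cks.map (fun c => if PySem.Set.contains r c then "Y" else "N"))

-- ===== PRECONDITION & SPEC =====
-- Pre_ keeps the problem's natural domain: a weight count 1 ≤ n ≤ len(gs) (otherwise A raises IndexError),
-- nonnegative used weights with a nonnegative tail sum (a negative weight can make A raise or scatter marks
-- through its table by index wraparound), and queries above -(sum(gs)+10) (below that A raises IndexError or
-- reads an unrelated table slot by wraparound).
def Pre_solution (n : Int) (gs : List Int) (m : Int) (cks : List Int) : Prop :=
  1 ≤ n ∧ n ≤ gs.length ∧ (∀ g ∈ gs.take n.toNat, 0 ≤ g) ∧ 0 ≤ (gs.drop n.toNat).sum ∧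
    (∀ c ∈ cks, -(gs.sum + (gs.drop n.toNat).sum + 10) < c)
instance (n : Int) (gs : List Int) (m : Int) (cks : List Int) : Decidable (Pre_solution n gs m cks) := by unfold Pre_solution; infer_instance
def pvWitness_solution : Int × List Int × Int × List Int := (3, [1, 5, 2], 2 + 2, [0, 2, 4, 7])

def Spec_solution (n : Int) (gs : List Int) (m : Int) (cks : List Int) (out : String) : Prop := out = solution_alt n gs m cks
instance (n : Int) (gs : List Int) (m : Int) (cks : List Int) (out : String) : Decidable (Spec_solution n gs m cks out) := by unfold Spec_solution; infer_instance

-- ===== CLAIM (what is proved, stated in full; the proofs are below) =====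
def Claim_equal_solution : Prop := ∀ (n : Int) (gs : List Int) (m : Int) (cks : List Int), Dom_solution n gs m cks → Pre_solution n gs m cks → Spec_solution n gs m cks (solution n gs m cks)

-- ===== LEMMAS AND PROOFS =====
-- pvRow s T is the DP row whose slot idx is 1 exactly when some signed value v ∈ T is stored there
-- (nonnegative v at index v, negative v at index 2s+10+v, Python's negative-index convention);
-- pvBS gs k is B's reachable set after the first k weights; the loop lemmas walk A's scans into set unions.
def pvIdxOf (s v : Int) : Int := if v < 0 then 2*s+10 + v else v

def pvRow (s : Int) (T : List Int) : List Int :=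
  (List.range (2*s+10).toNat).map (fun (idx : Nat) => if T.any (fun v => pvIdxOf s v == (idx : Int)) then 1 else 0)

lemma pvRow_length (s : Int) (T : List Int) : (pvRow s T).length = (2*s+10).toNat := by
  simp [pvRow]

lemma replicate_eq_pvRow_nil (s : Int) : List.replicate (2*s+10).toNat (0:Int) = pvRow s [] := by
  simp [pvRow, List.map_const']


lemma pvRow_getElem (s : Int) (T : List Int) (p : Nat) (hp : p < (2*s+10).toNat) :
    (pvRow s T)[p]'(by simpa [pvRow] using hp) =
      if T.any (fun v => pvIdxOf s v == (p : Int)) then 1 else 0 := by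
  simp only [pvRow, List.getElem_map, List.getElem_range]

lemma pvIdx_norm (s : Int) (T : List Int) (j : Int) (hs : 0 ≤ s)
    (h0 : -(2*s+10) ≤ j) (h1 : j < 2*s+10) :
    ∃ p : Nat, PySem.List.pyIdx? (pvRow s T).length j = some p ∧
      p < (2*s+10).toNat ∧ (p : Int) = pvIdxOf s j := by
  have hlen : (pvRow s T).length = (2*s+10).toNat := pvRow_length s T
  rcases le_or_gt 0 j with hj | hj
  · refine ⟨j.toNat, ?_, by omega, ?_⟩
    · simp only [PySem.List.pyIdx?, hlen]
      rw [if_pos hj, if_pos (by omega)]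
    · simp only [pvIdxOf]; split <;> omega
  · refine ⟨(2*s+10).toNat - (-j).toNat, ?_, by omega, ?_⟩
    · simp only [PySem.List.pyIdx?, hlen]
      rw [if_neg (by omega), if_pos (by omega)]
    · simp only [pvIdxOf]; split <;> omega

lemma pvRow_get (s : Int) (T : List Int) (j : Int) (hs : 0 ≤ s)
    (h0 : -(2*s+10) ≤ j) (h1 : j < 2*s+10) :
    PySem.List.pyGetD (pvRow s T) j 0 =
      if T.any (fun v => pvIdxOf s v == pvIdxOf s j) then 1 else 0 := by
  obtain ⟨p, hidx, hp, hpj⟩ := pvIdx_norm s T j hs h0 h1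
  have hp' : p < (pvRow s T).length := by rw [pvRow_length]; exact hp
  simp only [PySem.List.pyGetD, PySem.List.pyGet?, hidx, Option.bind_some]
  rw [List.getElem?_eq_getElem hp', Option.getD_some, pvRow_getElem s T p hp, hpj]

lemma pvRow_set (s : Int) (T : List Int) (j : Int) (hs : 0 ≤ s)
    (h0 : -(2*s+10) ≤ j) (h1 : j < 2*s+10) :
    PySem.List.pySetD (pvRow s T) j 1 = pvRow s (j :: T) := by
  obtain ⟨p, hidx, hp, hpj⟩ := pvIdx_norm s T j hs h0 h1
  simp only [PySem.List.pySetD, PySem.List.pySet?, hidx, Option.map_some, Option.getD_some]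
  apply List.ext_getElem
  · simp [pvRow, List.length_set]
  intro i hi hi'
  rw [List.getElem_set]
  have hir : i < (2*s+10).toNat := by simpa [pvRow, List.length_set] using hi
  rw [pvRow_getElem s (j :: T) i hir]
  by_cases hip : p = i
  · rw [if_pos hip]
    have : ((j :: T).any (fun v => pvIdxOf s v == (i : Int))) = true := by
      simp only [List.any_cons, Bool.or_eq_true, beq_iff_eq]
      left; omega
    rw [this]; simp
  · rw [if_neg hip, pvRow_getElem s T i hir]
    have : ((j :: T).any (fun v => pvIdxOf s v == (i : Int))) =
        (T.any (fun v => pvIdxOf s v == (i : Int))) := by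
      simp only [List.any_cons]
      have hne : (pvIdxOf s j == (i : Int)) = false := by
        simp only [beq_eq_false_iff_ne]; omega
      rw [hne, Bool.false_or]
    rw [this]

lemma pvAny_idx (s : Int) (T : List Int) (x : Int)
    (h : ∀ v ∈ T, pvIdxOf s v = pvIdxOf s x → v = x) :
    (T.any (fun v => pvIdxOf s v == pvIdxOf s x)) = decide (x ∈ T) := by
  by_cases hx : x ∈ T
  · rw [decide_eq_true hx]
    simp only [List.any_eq_true, beq_iff_eq]
    exact ⟨x, hx, rfl⟩
  · rw [decide_eq_false hx]
    simp only [List.any_eq_false, beq_iff_eq]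
    intro v hv heq
    exact hx (h v hv heq ▸ hv)

lemma pvRow_test_pos (s b : Int) (P : List Int) (j : Int) (hs : 0 ≤ s)
    (hb : ∀ v ∈ P, -b ≤ v ∧ v ≤ b) (hbs : b ≤ s) (hj0 : 0 ≤ j) (hj1 : j ≤ s) :
    (PySem.List.pyGetD (pvRow s P) j 0 == 1) = decide (j ∈ P) := by
  rw [pvRow_get s P j hs (by omega) (by omega)]
  rw [pvAny_idx s P j (fun v hv heq => by
    obtain ⟨h1, h2⟩ := hb v hv
    simp only [pvIdxOf] at heq
    split at heq <;> split at heq <;> omega)]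
  by_cases hj : j ∈ P <;> simp [hj]

lemma pvRow_test_neg (s b : Int) (P : List Int) (j : Int) (hs : 0 ≤ s)
    (hb : ∀ v ∈ P, -b ≤ v ∧ v ≤ b) (hbs : b ≤ s) (hj0 : 0 ≤ j) (hj1 : j ≤ s) :
    (PySem.List.pyGetD (pvRow s P) (-j) 0 == 1) = decide (-j ∈ P) := by
  rw [pvRow_get s P (-j) hs (by omega) (by omega)]
  rw [pvAny_idx s P (-j) (fun v hv heq => by
    obtain ⟨h1, h2⟩ := hb v hv
    simp only [pvIdxOf] at heq
    split at heq <;> split at heq <;> omega)]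
  by_cases hj : -j ∈ P <;> simp [hj]

lemma pvRow_read (s p : Int) (T : List Int) (c : Int) (hs : 0 ≤ s)
    (hb : ∀ v ∈ T, -p ≤ v ∧ v ≤ p) (hp : 0 ≤ p) (hps : p ≤ s)
    (hc0 : -(2*s+10) + p + 1 ≤ c) (hc1 : c ≤ s) :
    PySem.List.pyGetD (pvRow s T) c 0 = if c ∈ T then 1 else 0 := by
  rw [pvRow_get s T c hs (by omega) (by omega)]
  rw [pvAny_idx s T c (fun v hv heq => by
    obtain ⟨h1, h2⟩ := hb v hv
    simp only [pvIdxOf] at heq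
    split at heq <;> split at heq <;> omega)]
  by_cases hc : c ∈ T <;> simp [hc]

lemma pvLoop1 (s g b : Int) (P : List Int) (hs : 0 ≤ s) (hg : 0 ≤ g)
    (hb : ∀ v ∈ P, -b ≤ v ∧ v ≤ b) (hb0 : 0 ≤ b) (hbg : b + g ≤ s) :
    ∀ (js : List Int), (∀ j ∈ js, 0 ≤ j ∧ j ≤ s) → ∀ (T : List Int),
    ∃ T', (js.foldl (fun cur j =>
      if PySem.List.pyGetD (pvRow s P) j 0 == 1 then
        let cur := PySem.List.pySetD cur (j - g) 1
        let cur := PySem.List.pySetD cur j 1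
        if j + g ≤ s then PySem.List.pySetD cur (j + g) 1 else cur
      else cur) (pvRow s T)) = pvRow s T' ∧
      (∀ x, x ∈ T' ↔ x ∈ T ∨ ∃ j ∈ js, j ∈ P ∧ (x = j - g ∨ x = j ∨ x = j + g)) := by
  intro js
  induction js with
  | nil => exact fun _ T => ⟨T, rfl, by simp⟩
  | cons j js ih =>
    intro hjs T
    obtain ⟨hj0, hj1⟩ := hjs j (List.mem_cons_self ..)
    have htail : ∀ j ∈ js, 0 ≤ j ∧ j ≤ s := fun j hj => hjs j (List.mem_cons_of_mem _ hj)
    simp only [List.foldl_cons]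
    rw [pvRow_test_pos s b P j hs hb (by omega) hj0 hj1]
    by_cases hjP : j ∈ P
    · obtain ⟨hjb1, hjb2⟩ := hb j hjP
      rw [decide_eq_true hjP, if_pos rfl]
      simp only [pvRow_set s T (j - g) hs (by omega) (by omega),
                 pvRow_set s ((j - g) :: T) j hs (by omega) (by omega),
                 if_pos (show j + g ≤ s by omega),
                 pvRow_set s (j :: (j - g) :: T) (j + g) hs (by omega) (by omega)]
      obtain ⟨T', hT', hmem⟩ := ih htail ((j + g) :: j :: (j - g) :: T)
      refine ⟨T', hT', fun x => ?_⟩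
      rw [hmem x]
      simp only [List.mem_cons]
      constructor
      · rintro ((h1 | h2 | h3 | hx) | ⟨j', hj', hjP', hx⟩)
        · exact Or.inr ⟨j, Or.inl rfl, hjP, Or.inr (Or.inr h1)⟩
        · exact Or.inr ⟨j, Or.inl rfl, hjP, Or.inr (Or.inl h2)⟩
        · exact Or.inr ⟨j, Or.inl rfl, hjP, Or.inl h3⟩
        · exact Or.inl hx
        · exact Or.inr ⟨j', Or.inr hj', hjP', hx⟩
      · rintro (hx | ⟨j', hj', hjP', hx⟩)
        · exact Or.inl (Or.inr (Or.inr (Or.inr hx)))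
        · rcases hj' with rfl | hj'
          · rcases hx with h1 | h2 | h3
            · exact Or.inl (Or.inr (Or.inr (Or.inl h1)))
            · exact Or.inl (Or.inr (Or.inl h2))
            · exact Or.inl (Or.inl h3)
          · exact Or.inr ⟨j', hj', hjP', hx⟩
    · rw [decide_eq_false hjP]
      simp only [Bool.false_eq_true, if_false]
      obtain ⟨T', hT', hmem⟩ := ih htail T
      refine ⟨T', hT', fun x => ?_⟩
      rw [hmem x]
      simp only [List.mem_cons]
      constructor
      · rintro (hx | ⟨j', hj', hjP', hx⟩)
        · exact Or.inl hx
        · exact Or.inr ⟨j', Or.inr hj', hjP', hx⟩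
      · rintro (hx | ⟨j', hj', hjP', hx⟩)
        · exact Or.inl hx
        · rcases hj' with rfl | hj'
          · exact absurd hjP' hjP
          · exact Or.inr ⟨j', hj', hjP', hx⟩

lemma pvLoop2 (s g b : Int) (P : List Int) (hs : 0 ≤ s) (hg : 0 ≤ g)
    (hb : ∀ v ∈ P, -b ≤ v ∧ v ≤ b) (hb0 : 0 ≤ b) (hbg : b + g ≤ s) :
    ∀ (js : List Int), (∀ j ∈ js, 0 ≤ j ∧ j ≤ s) → ∀ (T : List Int),
    ∃ T', (js.foldl (fun cur j =>
      if PySem.List.pyGetD (pvRow s P) (-j) 0 == 1 then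
        let cur := PySem.List.pySetD cur (-j - g) 1
        let cur := PySem.List.pySetD cur (-j) 1
        if g - j ≥ -s then PySem.List.pySetD cur (g - j) 1 else cur
      else cur) (pvRow s T)) = pvRow s T' ∧
      (∀ x, x ∈ T' ↔ x ∈ T ∨ ∃ j ∈ js, -j ∈ P ∧ (x = -j - g ∨ x = -j ∨ x = g - j)) := by
  intro js
  induction js with
  | nil => exact fun _ T => ⟨T, rfl, by simp⟩
  | cons j js ih =>
    intro hjs T
    obtain ⟨hj0, hj1⟩ := hjs j (List.mem_cons_self ..)
    have htail : ∀ j ∈ js, 0 ≤ j ∧ j ≤ s := fun j hj => hjs j (List.mem_cons_of_mem _ hj)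
    simp only [List.foldl_cons]
    rw [pvRow_test_neg s b P j hs hb (by omega) hj0 hj1]
    by_cases hjP : -j ∈ P
    · obtain ⟨hjb1, hjb2⟩ := hb (-j) hjP
      rw [decide_eq_true hjP, if_pos rfl]
      simp only [pvRow_set s T (-j - g) hs (by omega) (by omega),
                 pvRow_set s ((-j - g) :: T) (-j) hs (by omega) (by omega),
                 if_pos (show g - j ≥ -s by omega),
                 pvRow_set s ((-j) :: (-j - g) :: T) (g - j) hs (by omega) (by omega)]
      obtain ⟨T', hT', hmem⟩ := ih htail ((g - j) :: (-j) :: (-j - g) :: T)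
      refine ⟨T', hT', fun x => ?_⟩
      rw [hmem x]
      simp only [List.mem_cons]
      constructor
      · rintro ((h1 | h2 | h3 | hx) | ⟨j', hj', hjP', hx⟩)
        · exact Or.inr ⟨j, Or.inl rfl, hjP, Or.inr (Or.inr h1)⟩
        · exact Or.inr ⟨j, Or.inl rfl, hjP, Or.inr (Or.inl h2)⟩
        · exact Or.inr ⟨j, Or.inl rfl, hjP, Or.inl h3⟩
        · exact Or.inl hx
        · exact Or.inr ⟨j', Or.inr hj', hjP', hx⟩
      · rintro (hx | ⟨j', hj', hjP', hx⟩)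
        · exact Or.inl (Or.inr (Or.inr (Or.inr hx)))
        · rcases hj' with rfl | hj'
          · rcases hx with h1 | h2 | h3
            · exact Or.inl (Or.inr (Or.inr (Or.inl h1)))
            · exact Or.inl (Or.inr (Or.inl h2))
            · exact Or.inl (Or.inl h3)
          · exact Or.inr ⟨j', hj', hjP', hx⟩
    · rw [decide_eq_false hjP, if_neg (by decide)]
      obtain ⟨T', hT', hmem⟩ := ih htail T
      refine ⟨T', hT', fun x => ?_⟩
      rw [hmem x]
      simp only [List.mem_cons]
      constructor
      · rintro (hx | ⟨j', hj', hjP', hx⟩)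
        · exact Or.inl hx
        · exact Or.inr ⟨j', Or.inr hj', hjP', hx⟩
      · rintro (hx | ⟨j', hj', hjP', hx⟩)
        · exact Or.inl hx
        · rcases hj' with rfl | hj'
          · exact absurd hjP' hjP
          · exact Or.inr ⟨j', hj', hjP', hx⟩

lemma pvStep_spec (s g b : Int) (P : List Int) (hs : 0 ≤ s) (hg : 0 ≤ g)
    (hb : ∀ v ∈ P, -b ≤ v ∧ v ≤ b) (hb0 : 0 ≤ b) (hbg : b + g ≤ s) :
    ∃ T', solStep s g (pvRow s P) = pvRow s T' ∧
      (∀ x, x ∈ T' ↔ ∃ d ∈ P, x = d + g ∨ x = d - g ∨ x = d) := by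
  have hjs : ∀ j ∈ PySem.List.pyRange 0 (s+1) 1, 0 ≤ j ∧ j ≤ s := by
    intro j hj; rw [PySem.List.mem_pyRange_one] at hj; omega
  obtain ⟨T1, h1, m1⟩ := pvLoop1 s g b P hs hg hb hb0 hbg (PySem.List.pyRange 0 (s+1) 1) hjs []
  obtain ⟨T2, h2, m2⟩ := pvLoop2 s g b P hs hg hb hb0 hbg (PySem.List.pyRange 0 (s+1) 1) hjs T1
  refine ⟨T2, ?_, ?_⟩
  · unfold solStep
    simp only [replicate_eq_pvRow_nil, h1, h2]
  · intro x
    rw [m2 x]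
    constructor
    · rintro (hT1 | ⟨j, hj, hjP, hx⟩)
      · rcases (m1 x).mp hT1 with h | ⟨j, hj, hjP, hx⟩
        · simp at h
        · exact ⟨j, hjP, by tauto⟩
      · refine ⟨-j, hjP, ?_⟩
        rcases hx with h|h|h
        · exact Or.inr (Or.inl (by omega))
        · exact Or.inr (Or.inr (by omega))
        · exact Or.inl (by omega)
    · rintro ⟨d, hdP, hx⟩
      obtain ⟨hd1, hd2⟩ := hb d hdP
      rcases le_or_gt 0 d with hd | hd
      · refine Or.inl ((m1 x).mpr (Or.inr ⟨d, ?_, hdP, by tauto⟩))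
        rw [PySem.List.mem_pyRange_one]; omega
      · refine Or.inr ⟨-d, ?_, by simpa using hdP, ?_⟩
        · rw [PySem.List.mem_pyRange_one]; omega
        · rcases hx with h|h|h
          · exact Or.inr (Or.inr (by omega))
          · exact Or.inl (by omega)
          · exact Or.inr (Or.inl (by omega))

def pvBS (gs : List Int) (k : Nat) : PySem.Set Int :=
  (gs.take k).foldl (fun r w => PySem.Set.ofList (r.flatMap (fun d => [d + w, d - w, d])))
    (PySem.Set.ofList [0])

lemma mem_pvBStep (w x : Int) (r : List Int) :
    x ∈ PySem.Set.ofList (r.flatMap (fun d => [d + w, d - w, d])) ↔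
      ∃ d ∈ r, x = d + w ∨ x = d - w ∨ x = d := by
  rw [PySem.Set.mem_ofList, List.mem_flatMap]
  constructor
  · rintro ⟨d, hd, hx⟩
    refine ⟨d, hd, ?_⟩
    simp only [List.mem_cons, List.not_mem_nil, or_false] at hx
    exact hx
  · rintro ⟨d, hd, hx⟩
    refine ⟨d, hd, ?_⟩
    rcases hx with h | h | h
    · exact List.mem_cons.mpr (Or.inl h)
    · exact List.mem_cons.mpr (Or.inr (List.mem_cons.mpr (Or.inl h)))
    · exact List.mem_cons.mpr (Or.inr (List.mem_cons.mpr (Or.inr (List.mem_cons.mpr (Or.inl h)))))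

lemma pvBS_succ (gs : List Int) (k : Nat) (hk : k < gs.length) :
    pvBS gs (k+1) = PySem.Set.ofList ((pvBS gs k).flatMap (fun d => [d + gs[k], d - gs[k], d])) := by
  unfold pvBS
  rw [List.take_add_one, List.getElem?_eq_getElem hk, Option.toList_some,
      List.foldl_append, List.foldl_cons, List.foldl_nil]

-- partial sums of the first K (nonnegative) weights are nonnegative and monotone in k
lemma pvTake_sum (gs : List Int) (K : Nat) (hg : ∀ g ∈ gs.take K, 0 ≤ g) (k : Nat) (hk : k ≤ K) :
    0 ≤ (gs.take k).sum ∧ (gs.take k).sum ≤ (gs.take K).sum := by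
  have htk : gs.take k = (gs.take K).take k := by
    rw [List.take_take, min_eq_left hk]
  constructor
  · exact List.sum_nonneg (fun x hx => hg x (List.mem_of_mem_take (htk ▸ hx)))
  · conv_rhs => rw [← List.take_append_drop k (gs.take K)]
    rw [List.sum_append, htk]
    have : 0 ≤ ((gs.take K).drop k).sum :=
      List.sum_nonneg (fun x hx => hg x (List.mem_of_mem_drop hx))
    omega

lemma pvTake_sum_succ (gs : List Int) (k : Nat) (hk : k < gs.length) :
    (gs.take (k+1)).sum = (gs.take k).sum + gs[k] := by
  rw [List.take_add_one, List.getElem?_eq_getElem hk, Option.toList_some, List.sum_append,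
      List.sum_cons, List.sum_nil, add_zero]

lemma pvBS_bound (gs : List Int) (K : Nat) (hg : ∀ g ∈ gs.take K, 0 ≤ g) :
    ∀ k : Nat, k ≤ K → k ≤ gs.length →
    0 ∈ pvBS gs k ∧ (∀ v ∈ pvBS gs k, -((gs.take k).sum) ≤ v ∧ v ≤ (gs.take k).sum) := by
  intro k
  induction k with
  | zero => intro _ _; refine ⟨by simp [pvBS, PySem.Set.mem_ofList], ?_⟩
            intro v hv
            simp [pvBS, PySem.Set.mem_ofList] at hv
            simp [hv]
  | succ k ih =>
    intro hkK hk1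
    have hk : k < gs.length := by omega
    obtain ⟨h0, hbd⟩ := ih (by omega) (by omega)
    have hgk : 0 ≤ gs[k] := by
      refine hg _ ?_
      rw [show gs[k] = (gs.take K)[k]'(by rw [List.length_take]; omega) from
        (List.getElem_take ..).symm]
      exact List.getElem_mem _
    rw [pvBS_succ gs k hk]
    constructor
    · exact (mem_pvBStep _ 0 _).mpr ⟨0, h0, Or.inr (Or.inr rfl)⟩
    · intro v hv
      obtain ⟨d, hd, hx⟩ := (mem_pvBStep _ v _).mp hv
      obtain ⟨hd1, hd2⟩ := hbd d hd
      rw [pvTake_sum_succ gs k hk]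
      rcases hx with h | h | h <;> omega

lemma pvRow0_spec (s g0 : Int) (hs : 0 ≤ s) (hg0 : 0 ≤ g0) (hg0s : g0 ≤ s) :
    solRow0 g0 s = pvRow s [g0, -g0, 0] := by
  unfold solRow0
  rw [replicate_eq_pvRow_nil,
      pvRow_set s [] 0 hs (by omega) (by omega),
      pvRow_set s [0] (-g0) hs (by omega) (by omega),
      pvRow_set s [-g0, 0] g0 hs (by omega) (by omega)]

lemma pvReach_eq (gs : List Int) : ∀ k : Nat, k ≤ gs.length → solAltReach gs k = pvBS gs k := by
  intro k
  induction k with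
  | zero => intro _; rfl
  | succ k ih =>
    intro hk1
    have hk : k < gs.length := by omega
    have hw : PySem.List.pyGetD gs (((k : Int) + 1) - 1) 0 = gs[k] := by
      rw [show ((k : Int) + 1) - 1 = (k : Int) by ring]
      rw [PySem.List.pyGetD_natCast, List.getD_eq_getElem _ _ hk]
    show PySem.Set.ofList ((solAltReach gs k).flatMap
        (fun d => [d + PySem.List.pyGetD gs (((k : Int) + 1) - 1) 0,
                   d - PySem.List.pyGetD gs (((k : Int) + 1) - 1) 0, d])) = pvBS gs (k+1)
    rw [hw, ih (by omega), ← pvBS_succ gs k hk]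

lemma pvOuter (gs : List Int) (K : Nat) (hK2 : K ≤ gs.length)
    (hg : ∀ g ∈ gs.take K, 0 ≤ g) (hsle : (gs.take K).sum ≤ gs.sum) (hne : gs ≠ []) :
    ∀ k : Nat, 1 ≤ k → k ≤ K →
    ∃ dp' T, (PySem.List.pyRange 1 (k : Int) 1).foldl
        (fun dp i => dp ++ [solStep gs.sum (PySem.List.pyGetD gs i 0)
          (PySem.List.pyGetD dp (i - 1) [])])
        [solRow0 (PySem.List.pyGetD gs 0 0) gs.sum]
      = dp' ++ [pvRow gs.sum T]
      ∧ dp'.length + 1 = k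
      ∧ (∀ x, x ∈ T ↔ x ∈ pvBS gs k) := by
  have h00 : 0 < gs.length := List.length_pos_of_ne_nil hne
  intro k
  induction k with
  | zero => omega
  | succ k ih =>
    intro _ hk1
    rcases Nat.eq_or_lt_of_le (show 1 ≤ k + 1 by omega) with hk0 | hk0
    · -- k + 1 = 1: no iterations
      have hknat : k = 0 := by omega
      subst hknat
      have h0 : gs[0]'(by omega) = PySem.List.pyGetD gs 0 0 := by
        rw [PySem.List.pyGetD_zero, List.getD_eq_getElem _ _ (by omega)]
      have hsum0 : (gs.take 1).sum = gs[0]'(by omega) := by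
        rw [pvTake_sum_succ gs 0 (by omega)]
        simp
      obtain ⟨hts0, hts1⟩ := pvTake_sum gs K hg 1 (by omega)
      have hs0 : (0:Int) ≤ gs.sum := by
        obtain ⟨h1, _⟩ := pvTake_sum gs K hg K le_rfl
        omega
      refine ⟨[], [PySem.List.pyGetD gs 0 0, -(PySem.List.pyGetD gs 0 0), 0], ?_, by simp, ?_⟩
      · rw [show ((1:Nat) : Int) = 1 by norm_num, PySem.List.pyRange_one_eq_nil (by omega),
          List.foldl_nil, List.nil_append]
        rw [pvRow0_spec gs.sum (PySem.List.pyGetD gs 0 0) (by omega) (by omega) (by omega)]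
      · intro x
        rw [pvBS_succ gs 0 (by omega), mem_pvBStep]
        unfold pvBS
        simp only [List.take_zero, List.foldl_nil]
        constructor
        · intro hx
          refine ⟨0, by simp [PySem.Set.mem_ofList], ?_⟩
          simp only [List.mem_cons, List.not_mem_nil, or_false] at hx
          rcases hx with h | h | h
          · exact Or.inl (by omega)
          · exact Or.inr (Or.inl (by omega))
          · exact Or.inr (Or.inr h)
        · rintro ⟨d, hd, hx⟩
          rw [PySem.Set.mem_ofList] at hd
          simp only [List.mem_cons, List.not_mem_nil, or_false] at hd
          subst hd
          simp only [List.mem_cons, List.not_mem_nil, or_false]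
          rcases hx with h | h | h
          · exact Or.inl (by omega)
          · exact Or.inr (Or.inl (by omega))
          · exact Or.inr (Or.inr h)
    · -- k ≥ 1: one more iteration
      obtain ⟨dp', T, hfold, hlen, hmem⟩ := ih (by omega) (by omega)
      have hkk : k < gs.length := by omega
      have hcast : ((k+1 : Nat) : Int) = (k : Int) + 1 := by push_cast; ring
      rw [hcast, PySem.List.pyRange_one_succ_right (by exact_mod_cast Nat.one_le_cast.mpr (by omega)),
        List.foldl_append, List.foldl_cons, List.foldl_nil, hfold]
      -- read DP[i-1] = last row
      have hidx : (k : Int) - 1 = (dp'.length : Int) := by omega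
      have hread : PySem.List.pyGetD (dp' ++ [pvRow gs.sum T]) ((k : Int) - 1) [] = pvRow gs.sum T := by
        rw [hidx]
        simp only [PySem.List.pyGetD, PySem.List.pyGet?_append_length, Option.getD_some]
      have hgk : PySem.List.pyGetD gs (k : Int) 0 = gs[k] := by
        rw [PySem.List.pyGetD_natCast, List.getD_eq_getElem _ _ hkk]
      rw [hread, hgk]
      -- apply the step lemma
      obtain ⟨hts0, hts1⟩ := pvTake_sum gs K hg (k+1) (by omega)
      obtain ⟨htk0, _⟩ := pvTake_sum gs K hg k (by omega)
      obtain ⟨_, hbd⟩ := pvBS_bound gs K hg k (by omega) (by omega)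
      have hb : ∀ v ∈ T, -((gs.take k).sum) ≤ v ∧ v ≤ (gs.take k).sum := by
        intro v hv; exact hbd v ((hmem v).mp hv)
      have hgk0 : 0 ≤ gs[k] := by
        refine hg _ ?_
        rw [show gs[k] = (gs.take K)[k]'(by rw [List.length_take]; omega) from
          (List.getElem_take ..).symm]
        exact List.getElem_mem _
      have hbg : (gs.take k).sum + gs[k] ≤ gs.sum := by
        have := pvTake_sum_succ gs k hkk; omega
      obtain ⟨T'', hstep, hmem''⟩ := pvStep_spec gs.sum gs[k] ((gs.take k).sum) T
        (by obtain ⟨h1, _⟩ := pvTake_sum gs K hg K le_rfl; omega) hgk0 hb htk0 hbg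
      rw [hstep]
      refine ⟨dp' ++ [pvRow gs.sum T], T'', by rw [List.append_assoc], by simp; omega, ?_⟩
      intro x
      rw [hmem'' x, pvBS_succ gs k hkk, mem_pvBStep]
      constructor
      · rintro ⟨d, hd, hx⟩
        exact ⟨d, (hmem d).mp hd, by tauto⟩
      · rintro ⟨d, hd, hx⟩
        exact ⟨d, (hmem d).mpr hd, by tauto⟩

theorem pv_main_equiv (n : Int) (gs : List Int) (m : Int) (cks : List Int)
    (hn1 : 1 ≤ n) (hn2 : n ≤ gs.length) (hg : ∀ g ∈ gs.take n.toNat, 0 ≤ g)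
    (hd : 0 ≤ (gs.drop n.toNat).sum)
    (hc : ∀ c ∈ cks, -(gs.sum + (gs.drop n.toNat).sum + 9) ≤ c) :
    solution n gs m cks = solution_alt n gs m cks := by
  have hne : gs ≠ [] := by
    intro h; subst h; simp at hn2; omega
  set k := n.toNat with hk
  have hnk : n = (k : Int) := (Int.toNat_of_nonneg (by omega)).symm
  have hk1 : 1 ≤ k := by omega
  have hk2 : k ≤ gs.length := by omega
  have hsplit : (gs.take k).sum + (gs.drop k).sum = gs.sum := by
    conv_rhs => rw [← List.take_append_drop k gs]
    rw [List.sum_append]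
  obtain ⟨htkn0, _⟩ := pvTake_sum gs k hg k le_rfl
  have hsle : (gs.take k).sum ≤ gs.sum := by omega
  have hs : (0:Int) ≤ gs.sum := by omega
  obtain ⟨dp', T, hfold, hlen, hmem⟩ := pvOuter gs k hk2 hg hsle hne k hk1 le_rfl
  obtain ⟨_, hbd⟩ := pvBS_bound gs k hg k le_rfl hk2
  obtain ⟨hts0, hts1⟩ := pvTake_sum gs k hg k le_rfl
  have hbT : ∀ v ∈ T, -(gs.take k).sum ≤ v ∧ v ≤ (gs.take k).sum := by
    intro v hv
    exact hbd v ((hmem v).mp hv)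
  simp only [solution, solution_alt]
  rw [hnk, hfold]
  rw [PySem.List.foldl_append_singleton_eq_map, List.nil_append]
  rw [Int.toNat_natCast, pvReach_eq gs k hk2]
  apply congrArg
  apply List.map_congr_left
  intro c hcin
  have hcge : -(gs.sum + (gs.drop k).sum + 9) ≤ c := hc c hcin
  rw [PySem.List.pyGetD_neg_one_append_singleton]
  by_cases hcs : gs.sum < c
  · rw [if_pos (by simp [hcs])]
    have hcB : c ∉ pvBS gs k := by
      intro h
      have := hbd c h
      omega
    rw [if_neg (by rw [PySem.Set.contains_iff]; exact fun h => hcB h)]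
  · rw [pvRow_read gs.sum ((gs.take k).sum) T c hs hbT htkn0 hsle (by omega) (by omega)]
    by_cases hcT : c ∈ T
    · rw [if_pos hcT]
      rw [if_neg (by simp [hcs])]
      rw [if_pos (by rw [PySem.Set.contains_iff]; exact (hmem c).mp hcT)]
    · rw [if_neg hcT]
      rw [if_pos (by simp [hcs])]
      rw [if_neg (by rw [PySem.Set.contains_iff]; exact fun h => hcT ((hmem c).mpr h))]

-- ===== VERDICT (by name: the statement is the Claim_ definition above) =====
theorem solution_spec : Claim_equal_solution := by
  intro n gs m cks _ hpre
  obtain ⟨hn1, hn2, hg, hd, hc⟩ := hpre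
  exact pv_main_equiv n gs m cks hn1 hn2 hg hd (fun c hcm => by have := hc c hcm; omega)
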